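-- pv_equiv track=rewrite | github.com/polskiTran/UC26_Intro_Cloud_Computing | assignment3/script.py | handle_contraction
-- ===== SOURCE A (Python) =====
-- def handle_contraction(text: str) -> str:
--     """
--     Handles contractions in the text.
--
--     Args:
--         text (str): The input text.
--
--     Returns:
--         str: The text with contractions handled.
--     """
--     contractions = {
--         "n't": " not",
--         "'re": " are",
--         "'s": " is",
--         "'m": " am",
--         "'ve": " have",
--         "'ll": " will",
--         "'d": " would",
--     }
--     for contraction, replacement in contractions.items():
--         text = text.replace(contraction, replacement)
--     return text
-- ===== SOURCE B (Python) =====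
-- def handle_contraction(text: str) -> str:
--     """Single left-to-right scan replacing each contraction where it occurs."""
--     contractions = {
--         "n't": " not",
--         "'re": " are",
--         "'s": " is",
--         "'m": " am",
--         "'ve": " have",
--         "'ll": " will",
--         "'d": " would",
--     }
--     out = []
--     i = 0
--     n = len(text)
--     while i < n:
--         for pat, rep in contractions.items():
--             if text.startswith(pat, i):
--                 out.append(rep)
--                 i += len(pat)
--                 break
--         else:
--             out.append(text[i])
--             i += 1
--     return "".join(out)
-- ===== Notes on version B (the rewrite author's own statement) =====
-- stated objective: alternative
-- what changed: Replaces A's seven sequential full-text str.replace passes with a single left-to-right scan that tries each contraction at the current position and emits its replacement (equivalent because no replacement contains an apostrophe or "n't", so no pass can create or destroy a later match).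
import Mathlib
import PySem

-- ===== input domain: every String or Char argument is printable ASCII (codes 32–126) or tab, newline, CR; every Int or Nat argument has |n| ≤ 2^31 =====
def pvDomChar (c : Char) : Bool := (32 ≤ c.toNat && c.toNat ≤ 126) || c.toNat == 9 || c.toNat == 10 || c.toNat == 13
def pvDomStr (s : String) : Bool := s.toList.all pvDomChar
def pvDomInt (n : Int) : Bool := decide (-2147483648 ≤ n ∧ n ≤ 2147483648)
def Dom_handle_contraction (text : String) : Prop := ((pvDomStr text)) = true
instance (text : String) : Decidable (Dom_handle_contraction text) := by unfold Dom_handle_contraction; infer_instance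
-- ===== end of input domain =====

-- B replaces A's seven sequential full-text str.replace passes by ONE left-to-right scan that
-- matches each contraction at the current position (an alternative decomposition, same result).

-- ===== PORT A =====
-- the contractions dict, in insertion order
def hcContractions : List (String × String) :=
  [("n't", " not"), ("'re", " are"), ("'s", " is"), ("'m", " am"),
   ("'ve", " have"), ("'ll", " will"), ("'d", " would")]

def handle_contraction (text : String) : String :=
  hcContractions.foldl (fun t p => PySem.Str.replace t p.1 p.2) text

-- ===== PORT B =====
-- B's inner for-loop over the dict, unrolled in dict order: at each position try each
-- contraction with startswith, emit its replacement, else copy one character.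
def hcScan : List Char → List Char
  | 'n' :: '\'' :: 't' :: rest => ' ' :: 'n' :: 'o' :: 't' :: hcScan rest
  | '\'' :: 'r' :: 'e' :: rest => ' ' :: 'a' :: 'r' :: 'e' :: hcScan rest
  | '\'' :: 's' :: rest => ' ' :: 'i' :: 's' :: hcScan rest
  | '\'' :: 'm' :: rest => ' ' :: 'a' :: 'm' :: hcScan rest
  | '\'' :: 'v' :: 'e' :: rest => ' ' :: 'h' :: 'a' :: 'v' :: 'e' :: hcScan rest
  | '\'' :: 'l' :: 'l' :: rest => ' ' :: 'w' :: 'i' :: 'l' :: 'l' :: hcScan rest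
  | '\'' :: 'd' :: rest => ' ' :: 'w' :: 'o' :: 'u' :: 'l' :: 'd' :: hcScan rest
  | c :: rest => c :: hcScan rest
  | [] => []

def handle_contraction_alt (text : String) : String := String.ofList (hcScan text.toList)

-- ===== PRECONDITION & SPEC =====
def Spec_handle_contraction (text : String) (out : String) : Prop := out = handle_contraction_alt text
instance (text : String) (out : String) : Decidable (Spec_handle_contraction text out) := by unfold Spec_handle_contraction; infer_instance

-- ===== CLAIM (what is proved, stated in full; the proofs are below) =====
def Claim_equal_handle_contraction : Prop := ∀ (text : String), Dom_handle_contraction text → Spec_handle_contraction text (handle_contraction text)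

-- ===== LEMMAS AND PROOFS =====

-- fuel-free form of PySem.Chars.replace (for a non-empty pattern)
def repF (pat rep : List Char) : List Char → List Char
  | [] => []
  | c :: t =>
    if pat.isPrefixOf (c :: t) then rep ++ repF pat rep (List.drop (pat.length - 1) t)
    else c :: repF pat rep t
termination_by l => l.length
decreasing_by
  · exact Nat.lt_succ_of_le (by simp)
  · simp

lemma repF_nil (pat rep : List Char) : repF pat rep [] = [] := by simp [repF]

lemma repF_match (pat rep : List Char) (c : Char) (t : List Char)
    (h : pat.isPrefixOf (c :: t) = true) :
    repF pat rep (c :: t) = rep ++ repF pat rep (List.drop (pat.length - 1) t) := by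
  rw [repF, if_pos h]

lemma repF_skip (pat rep : List Char) (c : Char) (t : List Char)
    (h : pat.isPrefixOf (c :: t) = false) :
    repF pat rep (c :: t) = c :: repF pat rep t := by
  rw [repF, if_neg (by simp [h])]

lemma repF_skip_head (pat rep : List Char) (p c : Char) (t : List Char)
    (hp : pat.head? = some p) (hne : p ≠ c) :
    repF pat rep (c :: t) = c :: repF pat rep t := by
  cases pat with
  | nil => simp at hp
  | cons q qs =>
    simp at hp; subst hp
    exact repF_skip _ _ _ _ (by simp [List.isPrefixOf]; intro h; exact (hne h).elim)

lemma replace_go_eq_repF (old new : List Char) (hold : old ≠ []) :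
    ∀ fuel l acc, l.length ≤ fuel →
      PySem.Chars.replace.go old new fuel l acc = acc.reverse ++ repF old new l := by
  intro fuel
  induction fuel with
  | zero =>
    intro l acc hl
    have : l = [] := List.eq_nil_of_length_eq_zero (Nat.le_zero.mp hl)
    subst this; simp [PySem.Chars.replace.go, repF_nil]
  | succ n ih =>
    intro l acc hl
    cases l with
    | nil => simp [PySem.Chars.replace.go, repF_nil]
    | cons c t =>
      by_cases h : old.isPrefixOf (c :: t) = true
      · have hlen : 1 ≤ old.length := by
          cases old with | nil => exact absurd rfl hold | cons _ _ => simp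
        have hdrop : List.drop old.length (c :: t) = List.drop (old.length - 1) t := by
          cases old with | nil => exact absurd rfl hold | cons _ os => simp
        rw [show PySem.Chars.replace.go old new (n+1) (c :: t) acc
              = PySem.Chars.replace.go old new n (List.drop old.length (c :: t)) (new.reverse ++ acc) by
              simp [PySem.Chars.replace.go, h],
            ih _ _ (by simp at hl ⊢; omega),
            repF_match _ _ _ _ h, hdrop]
        simp
      · rw [show PySem.Chars.replace.go old new (n+1) (c :: t) acc
              = PySem.Chars.replace.go old new n t (c :: acc) by
              simp [PySem.Chars.replace.go, h],
            ih _ _ (by simp at hl; omega),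
            repF_skip _ _ _ _ (Bool.eq_false_iff.mpr h)]
        simp

lemma replace_eq_repF (s old new : List Char) (hold : old ≠ []) :
    PySem.Chars.replace s old new = repF old new s := by
  rw [PySem.Chars.replace, if_neg (by simp [List.isEmpty_iff, hold])]
  simpa using replace_go_eq_repF old new hold s.length s [] le_rfl

-- the seven passes of A, as functions on char lists, innermost first
def passNT (l : List Char) : List Char := repF ['n', '\'', 't'] [' ', 'n', 'o', 't'] l
def passRE (l : List Char) : List Char := repF ['\'', 'r', 'e'] [' ', 'a', 'r', 'e'] l
def passS (l : List Char) : List Char := repF ['\'', 's'] [' ', 'i', 's'] l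
def passM (l : List Char) : List Char := repF ['\'', 'm'] [' ', 'a', 'm'] l
def passVE (l : List Char) : List Char := repF ['\'', 'v', 'e'] [' ', 'h', 'a', 'v', 'e'] l
def passLL (l : List Char) : List Char := repF ['\'', 'l', 'l'] [' ', 'w', 'i', 'l', 'l'] l
def passD (l : List Char) : List Char := repF ['\'', 'd'] [' ', 'w', 'o', 'u', 'l', 'd'] l

def hcChain (l : List Char) : List Char :=
  passD (passLL (passVE (passM (passS (passRE (passNT l))))))

lemma repF_skip' (pat rep : List Char) (c : Char) (t : List Char)
    (h : ¬ pat <+: (c :: t)) :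
    repF pat rep (c :: t) = c :: repF pat rep t :=
  repF_skip _ _ _ _ (Bool.eq_false_iff.mpr (fun hb => h (List.isPrefixOf_iff_prefix.mp hb)))

-- the head of repF's output is the head of the input, unless a replacement (starting ' ') was emitted
lemma repF_head (pat rep : List Char) (hrep : rep.head? = some ' ') (u : List Char) :
    (repF pat rep u).head? = some ' ' ∨ (repF pat rep u).head? = u.head? := by
  cases u with
  | nil => right; simp [repF_nil]
  | cons c t =>
    by_cases h : pat.isPrefixOf (c :: t) = true
    · left
      rw [repF_match _ _ _ _ h]
      cases rep with
      | nil => simp at hrep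
      | cons r rs => simp at hrep; simp [hrep]
    · right; rw [repF_skip _ _ _ _ (Bool.eq_false_iff.mpr h)]; rfl

lemma repF_head_ne (pat rep : List Char) (hrep : rep.head? = some ' ') (a : Char)
    (ha : a ≠ ' ') (u : List Char) (h : (repF pat rep u).head? = some a) :
    u.head? = some a := by
  rcases repF_head pat rep hrep u with h' | h'
  · rw [h'] at h; simp at h; exact absurd h.symm ha
  · rw [h'] at h; exact h

lemma repF_prefix2 (pat rep : List Char) (hrep : rep.head? = some ' ') (a b : Char)
    (ha : a ≠ ' ') (hb : b ≠ ' ') (u : List Char) (h : [a, b] <+: repF pat rep u) :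
    [a, b] <+: u := by
  cases u with
  | nil => simp [repF_nil] at h
  | cons c t =>
    by_cases hm : pat.isPrefixOf (c :: t) = true
    · rw [repF_match _ _ _ _ hm] at h
      cases rep with
      | nil => simp at hrep
      | cons r rs =>
        simp at hrep; subst hrep
        rcases h with ⟨t', ht'⟩
        simp at ht'
        exact (ha ht'.1).elim
    · rw [repF_skip _ _ _ _ (Bool.eq_false_iff.mpr hm)] at h
      rcases h with ⟨t', ht'⟩
      simp at ht'
      obtain ⟨rfl, ht⟩ := ht'
      have hh : (repF pat rep t).head? = some b := by rw [← ht]; simp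
      have := repF_head_ne pat rep hrep b hb t hh
      cases t with
      | nil => simp at this
      | cons d t2 =>
        simp at this; subst this
        exact ⟨t2, rfl⟩

-- per-pass skip/match lemmas
lemma passNT_cons (c : Char) (l : List Char) (h : c ≠ 'n') :
    passNT (c :: l) = c :: passNT l :=
  repF_skip_head _ _ _ _ _ rfl (fun e => h e.symm)

lemma passRE_cons (c : Char) (l : List Char) (h : c ≠ '\'') :
    passRE (c :: l) = c :: passRE l :=
  repF_skip_head _ _ _ _ _ rfl (fun e => h e.symm)

lemma passS_cons (c : Char) (l : List Char) (h : c ≠ '\'') :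
    passS (c :: l) = c :: passS l :=
  repF_skip_head _ _ _ _ _ rfl (fun e => h e.symm)

lemma passM_cons (c : Char) (l : List Char) (h : c ≠ '\'') :
    passM (c :: l) = c :: passM l :=
  repF_skip_head _ _ _ _ _ rfl (fun e => h e.symm)

lemma passVE_cons (c : Char) (l : List Char) (h : c ≠ '\'') :
    passVE (c :: l) = c :: passVE l :=
  repF_skip_head _ _ _ _ _ rfl (fun e => h e.symm)

lemma passLL_cons (c : Char) (l : List Char) (h : c ≠ '\'') :
    passLL (c :: l) = c :: passLL l :=
  repF_skip_head _ _ _ _ _ rfl (fun e => h e.symm)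

lemma passD_cons (c : Char) (l : List Char) (h : c ≠ '\'') :
    passD (c :: l) = c :: passD l :=
  repF_skip_head _ _ _ _ _ rfl (fun e => h e.symm)

-- skip an apostrophe followed by a non-matching second char
lemma passRE_cons2 (x : Char) (l : List Char) (h2 : x ≠ 'r') (h1 : x ≠ '\'') :
    passRE ('\'' :: x :: l) = '\'' :: x :: passRE l := by
  simp only [passRE]
  rw [repF_skip' _ _ _ _ (by simp [List.cons_prefix_cons]; intro h; exact (h2 h.symm).elim),
      repF_skip_head _ _ _ _ _ rfl (fun e => h1 e.symm)]

lemma passS_cons2 (x : Char) (l : List Char) (h2 : x ≠ 's') (h1 : x ≠ '\'') :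
    passS ('\'' :: x :: l) = '\'' :: x :: passS l := by
  simp only [passS]
  rw [repF_skip' _ _ _ _ (by simp [List.cons_prefix_cons]; intro h; exact (h2 h.symm).elim),
      repF_skip_head _ _ _ _ _ rfl (fun e => h1 e.symm)]

lemma passM_cons2 (x : Char) (l : List Char) (h2 : x ≠ 'm') (h1 : x ≠ '\'') :
    passM ('\'' :: x :: l) = '\'' :: x :: passM l := by
  simp only [passM]
  rw [repF_skip' _ _ _ _ (by simp [List.cons_prefix_cons]; intro h; exact (h2 h.symm).elim),
      repF_skip_head _ _ _ _ _ rfl (fun e => h1 e.symm)]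

lemma passVE_cons2 (x : Char) (l : List Char) (h2 : x ≠ 'v') (h1 : x ≠ '\'') :
    passVE ('\'' :: x :: l) = '\'' :: x :: passVE l := by
  simp only [passVE]
  rw [repF_skip' _ _ _ _ (by simp [List.cons_prefix_cons]; intro h; exact (h2 h.symm).elim),
      repF_skip_head _ _ _ _ _ rfl (fun e => h1 e.symm)]

lemma passLL_cons2 (x : Char) (l : List Char) (h2 : x ≠ 'l') (h1 : x ≠ '\'') :
    passLL ('\'' :: x :: l) = '\'' :: x :: passLL l := by
  simp only [passLL]
  rw [repF_skip' _ _ _ _ (by simp [List.cons_prefix_cons]; intro h; exact (h2 h.symm).elim),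
      repF_skip_head _ _ _ _ _ rfl (fun e => h1 e.symm)]

-- match lemmas
lemma passNT_match (l : List Char) :
    passNT ('n' :: '\'' :: 't' :: l) = ' ' :: 'n' :: 'o' :: 't' :: passNT l := by
  rw [passNT, repF_match _ _ _ _ (by simp [List.isPrefixOf])]; rfl

lemma passRE_match (l : List Char) :
    passRE ('\'' :: 'r' :: 'e' :: l) = ' ' :: 'a' :: 'r' :: 'e' :: passRE l := by
  rw [passRE, repF_match _ _ _ _ (by simp [List.isPrefixOf])]; rfl

lemma passS_match (l : List Char) :
    passS ('\'' :: 's' :: l) = ' ' :: 'i' :: 's' :: passS l := by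
  rw [passS, repF_match _ _ _ _ (by simp [List.isPrefixOf])]; rfl

lemma passM_match (l : List Char) :
    passM ('\'' :: 'm' :: l) = ' ' :: 'a' :: 'm' :: passM l := by
  rw [passM, repF_match _ _ _ _ (by simp [List.isPrefixOf])]; rfl

lemma passVE_match (l : List Char) :
    passVE ('\'' :: 'v' :: 'e' :: l) = ' ' :: 'h' :: 'a' :: 'v' :: 'e' :: passVE l := by
  rw [passVE, repF_match _ _ _ _ (by simp [List.isPrefixOf])]; rfl

lemma passLL_match (l : List Char) :
    passLL ('\'' :: 'l' :: 'l' :: l) = ' ' :: 'w' :: 'i' :: 'l' :: 'l' :: passLL l := by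
  rw [passLL, repF_match _ _ _ _ (by simp [List.isPrefixOf])]; rfl

lemma passD_match (l : List Char) :
    passD ('\'' :: 'd' :: l) = ' ' :: 'w' :: 'o' :: 'u' :: 'l' :: 'd' :: passD l := by
  rw [passD, repF_match _ _ _ _ (by simp [List.isPrefixOf])]; rfl

-- push a pass through a literal block containing no character that can start its pattern
lemma passNT_append (s l : List Char) (hs : 'n' ∉ s) : passNT (s ++ l) = s ++ passNT l := by
  induction s with
  | nil => simp
  | cons c cs ih =>
    simp at hs
    rw [List.cons_append, passNT_cons c _ (fun e => hs.1 e.symm), ih hs.2, List.cons_append]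

lemma passRE_append (s l : List Char) (hs : '\'' ∉ s) : passRE (s ++ l) = s ++ passRE l := by
  induction s with
  | nil => simp
  | cons c cs ih =>
    simp at hs
    rw [List.cons_append, passRE_cons c _ (fun e => hs.1 e.symm), ih hs.2, List.cons_append]

lemma passS_append (s l : List Char) (hs : '\'' ∉ s) : passS (s ++ l) = s ++ passS l := by
  induction s with
  | nil => simp
  | cons c cs ih =>
    simp at hs
    rw [List.cons_append, passS_cons c _ (fun e => hs.1 e.symm), ih hs.2, List.cons_append]

lemma passM_append (s l : List Char) (hs : '\'' ∉ s) : passM (s ++ l) = s ++ passM l := by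
  induction s with
  | nil => simp
  | cons c cs ih =>
    simp at hs
    rw [List.cons_append, passM_cons c _ (fun e => hs.1 e.symm), ih hs.2, List.cons_append]

lemma passVE_append (s l : List Char) (hs : '\'' ∉ s) : passVE (s ++ l) = s ++ passVE l := by
  induction s with
  | nil => simp
  | cons c cs ih =>
    simp at hs
    rw [List.cons_append, passVE_cons c _ (fun e => hs.1 e.symm), ih hs.2, List.cons_append]

lemma passLL_append (s l : List Char) (hs : '\'' ∉ s) : passLL (s ++ l) = s ++ passLL l := by
  induction s with
  | nil => simp
  | cons c cs ih =>
    simp at hs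
    rw [List.cons_append, passLL_cons c _ (fun e => hs.1 e.symm), ih hs.2, List.cons_append]

lemma passD_append (s l : List Char) (hs : '\'' ∉ s) : passD (s ++ l) = s ++ passD l := by
  induction s with
  | nil => simp
  | cons c cs ih =>
    simp at hs
    rw [List.cons_append, passD_cons c _ (fun e => hs.1 e.symm), ih hs.2, List.cons_append]

-- after the matching pass fires, the later passes slide over the emitted replacement
lemma chain_after_RE (X : List Char) :
    passD (passLL (passVE (passM (passS ([' ', 'a', 'r', 'e'] ++ X)))))
      = [' ', 'a', 'r', 'e'] ++ passD (passLL (passVE (passM (passS X)))) := by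
  rw [passS_append _ _ (by decide), passM_append _ _ (by decide),
      passVE_append _ _ (by decide), passLL_append _ _ (by decide),
      passD_append _ _ (by decide)]

lemma chain_after_NT (X : List Char) :
    passD (passLL (passVE (passM (passS (passRE ([' ', 'n', 'o', 't'] ++ X))))))
      = [' ', 'n', 'o', 't'] ++ passD (passLL (passVE (passM (passS (passRE X))))) := by
  rw [passRE_append _ _ (by decide), passS_append _ _ (by decide), passM_append _ _ (by decide),
      passVE_append _ _ (by decide), passLL_append _ _ (by decide),
      passD_append _ _ (by decide)]

lemma chain_after_S (X : List Char) :
    passD (passLL (passVE (passM ([' ', 'i', 's'] ++ X))))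
      = [' ', 'i', 's'] ++ passD (passLL (passVE (passM X))) := by
  rw [passM_append _ _ (by decide), passVE_append _ _ (by decide),
      passLL_append _ _ (by decide), passD_append _ _ (by decide)]

lemma chain_after_M (X : List Char) :
    passD (passLL (passVE ([' ', 'a', 'm'] ++ X)))
      = [' ', 'a', 'm'] ++ passD (passLL (passVE X)) := by
  rw [passVE_append _ _ (by decide), passLL_append _ _ (by decide),
      passD_append _ _ (by decide)]

lemma chain_after_VE (X : List Char) :
    passD (passLL ([' ', 'h', 'a', 'v', 'e'] ++ X))
      = [' ', 'h', 'a', 'v', 'e'] ++ passD (passLL X) := by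
  rw [passLL_append _ _ (by decide), passD_append _ _ (by decide)]

lemma chain_after_LL (X : List Char) :
    passD ([' ', 'w', 'i', 'l', 'l'] ++ X) = [' ', 'w', 'i', 'l', 'l'] ++ passD X :=
  passD_append _ _ (by decide)

theorem hcChain_eq_scan (l : List Char) : hcChain l = hcScan l := by
  induction l using hcScan.induct with
  | case1 rest ih =>
    rw [hcScan]
    simp only [hcChain, passNT_match]
    rw [show (' ' :: 'n' :: 'o' :: 't' :: passNT rest) = [' ', 'n', 'o', 't'] ++ passNT rest
          from rfl, chain_after_NT]
    simp only [List.cons_append, List.nil_append]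
    rw [show passD (passLL (passVE (passM (passS (passRE (passNT rest)))))) = hcChain rest
          from rfl, ih]
  | case2 rest ih =>
    rw [hcScan]
    simp only [hcChain]
    rw [show ('\'' :: 'r' :: 'e' :: rest) = ['\'', 'r', 'e'] ++ rest from rfl,
        passNT_append _ _ (by decide)]
    simp only [List.cons_append, List.nil_append]
    rw [passRE_match,
        show (' ' :: 'a' :: 'r' :: 'e' :: passRE (passNT rest))
          = [' ', 'a', 'r', 'e'] ++ passRE (passNT rest) from rfl, chain_after_RE]
    simp only [List.cons_append, List.nil_append]
    rw [show passD (passLL (passVE (passM (passS (passRE (passNT rest)))))) = hcChain rest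
          from rfl, ih]
  | case3 rest ih =>
    rw [hcScan]
    simp only [hcChain]
    rw [show ('\'' :: 's' :: rest) = ['\'', 's'] ++ rest from rfl,
        passNT_append _ _ (by decide)]
    simp only [List.cons_append, List.nil_append]
    rw [passRE_cons2 's' _ (by decide) (by decide), passS_match,
        show (' ' :: 'i' :: 's' :: passS (passRE (passNT rest)))
          = [' ', 'i', 's'] ++ passS (passRE (passNT rest)) from rfl, chain_after_S]
    simp only [List.cons_append, List.nil_append]
    rw [show passD (passLL (passVE (passM (passS (passRE (passNT rest)))))) = hcChain rest
          from rfl, ih]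
  | case4 rest ih =>
    rw [hcScan]
    simp only [hcChain]
    rw [show ('\'' :: 'm' :: rest) = ['\'', 'm'] ++ rest from rfl,
        passNT_append _ _ (by decide)]
    simp only [List.cons_append, List.nil_append]
    rw [passRE_cons2 'm' _ (by decide) (by decide), passS_cons2 'm' _ (by decide) (by decide),
        passM_match,
        show (' ' :: 'a' :: 'm' :: passM (passS (passRE (passNT rest))))
          = [' ', 'a', 'm'] ++ passM (passS (passRE (passNT rest))) from rfl, chain_after_M]
    simp only [List.cons_append, List.nil_append]
    rw [show passD (passLL (passVE (passM (passS (passRE (passNT rest)))))) = hcChain rest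
          from rfl, ih]
  | case5 rest ih =>
    rw [hcScan]
    simp only [hcChain]
    rw [show ('\'' :: 'v' :: 'e' :: rest) = ['\'', 'v', 'e'] ++ rest from rfl,
        passNT_append _ _ (by decide)]
    simp only [List.cons_append, List.nil_append]
    rw [passRE_cons2 'v' _ (by decide) (by decide), passRE_cons 'e' _ (by decide),
        passS_cons2 'v' _ (by decide) (by decide), passS_cons 'e' _ (by decide),
        passM_cons2 'v' _ (by decide) (by decide), passM_cons 'e' _ (by decide),
        passVE_match,
        show (' ' :: 'h' :: 'a' :: 'v' :: 'e' :: passVE (passM (passS (passRE (passNT rest)))))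
          = [' ', 'h', 'a', 'v', 'e'] ++ passVE (passM (passS (passRE (passNT rest)))) from rfl,
        chain_after_VE]
    simp only [List.cons_append, List.nil_append]
    rw [show passD (passLL (passVE (passM (passS (passRE (passNT rest)))))) = hcChain rest
          from rfl, ih]
  | case6 rest ih =>
    rw [hcScan]
    simp only [hcChain]
    rw [show ('\'' :: 'l' :: 'l' :: rest) = ['\'', 'l', 'l'] ++ rest from rfl,
        passNT_append _ _ (by decide)]
    simp only [List.cons_append, List.nil_append]
    rw [passRE_cons2 'l' _ (by decide) (by decide), passRE_cons 'l' _ (by decide),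
        passS_cons2 'l' _ (by decide) (by decide), passS_cons 'l' _ (by decide),
        passM_cons2 'l' _ (by decide) (by decide), passM_cons 'l' _ (by decide),
        passVE_cons2 'l' _ (by decide) (by decide), passVE_cons 'l' _ (by decide),
        passLL_match,
        show (' ' :: 'w' :: 'i' :: 'l' :: 'l' :: passLL (passVE (passM (passS (passRE (passNT rest))))))
          = [' ', 'w', 'i', 'l', 'l'] ++ passLL (passVE (passM (passS (passRE (passNT rest))))) from rfl,
        chain_after_LL]
    simp only [List.cons_append, List.nil_append]
    rw [show passD (passLL (passVE (passM (passS (passRE (passNT rest)))))) = hcChain rest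
          from rfl, ih]
  | case7 rest ih =>
    rw [hcScan]
    simp only [hcChain]
    rw [show ('\'' :: 'd' :: rest) = ['\'', 'd'] ++ rest from rfl,
        passNT_append _ _ (by decide)]
    simp only [List.cons_append, List.nil_append]
    rw [passRE_cons2 'd' _ (by decide) (by decide), passS_cons2 'd' _ (by decide) (by decide),
        passM_cons2 'd' _ (by decide) (by decide), passVE_cons2 'd' _ (by decide) (by decide),
        passLL_cons2 'd' _ (by decide) (by decide), passD_match]
    rw [show passD (passLL (passVE (passM (passS (passRE (passNT rest)))))) = hcChain rest
          from rfl, ih]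
  | case8 c rest h1 h2 h3 h4 h5 h6 h7 ih =>
    rw [hcScan.eq_8 c rest h1 h2 h3 h4 h5 h6 h7, ← ih]
    by_cases hn : c = 'n'
    · subst hn
      have hnt : ¬ ['n', '\'', 't'] <+: ('n' :: rest) := by
        rintro ⟨t', ht'⟩
        simp at ht'
        exact h1 t' rfl ht'.symm
      simp only [hcChain, passNT]
      rw [repF_skip' _ _ _ _ hnt]
      rw [passRE_cons 'n' _ (by decide), passS_cons 'n' _ (by decide),
          passM_cons 'n' _ (by decide), passVE_cons 'n' _ (by decide),
          passLL_cons 'n' _ (by decide), passD_cons 'n' _ (by decide)]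
    · by_cases hq : c = '\''
      · subst hq
        have hre : ¬ ['r', 'e'] <+: rest := by
          rintro ⟨t', ht'⟩; exact h2 t' rfl ht'.symm
        have hs : rest.head? ≠ some 's' := by
          intro hh
          cases rest with
          | nil => simp at hh
          | cons d t => simp at hh; exact h3 t (by rfl) (by rw [hh])
        have hm : rest.head? ≠ some 'm' := by
          intro hh
          cases rest with
          | nil => simp at hh
          | cons d t => simp at hh; exact h4 t (by rfl) (by rw [hh])
        have hve : ¬ ['v', 'e'] <+: rest := by
          rintro ⟨t', ht'⟩; exact h5 t' rfl ht'.symm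
        have hll : ¬ ['l', 'l'] <+: rest := by
          rintro ⟨t', ht'⟩; exact h6 t' rfl ht'.symm
        have hd : rest.head? ≠ some 'd' := by
          intro hh
          cases rest with
          | nil => simp at hh
          | cons d t => simp at hh; exact h7 t (by rfl) (by rw [hh])
        -- push the apostrophe through each pass
        have s1 : passNT ('\'' :: rest) = '\'' :: passNT rest := passNT_cons _ _ (by decide)
        have hre1 : ¬ ['r', 'e'] <+: passNT rest := by
          intro h; simp only [passNT] at h
          exact hre (repF_prefix2 _ _ rfl _ _ (by decide) (by decide) _ h)
        have s2 : passRE ('\'' :: passNT rest) = '\'' :: passRE (passNT rest) :=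
          repF_skip' _ _ _ _ (by
            rw [List.cons_prefix_cons]; rintro ⟨-, h⟩; exact hre1 h)
        have hs1 : (passRE (passNT rest)).head? ≠ some 's' := by
          intro hh; simp only [passNT, passRE] at hh
          exact hs (repF_head_ne _ _ rfl _ (by decide) _
            (repF_head_ne _ _ rfl _ (by decide) _ hh))
        have s3 : passS ('\'' :: passRE (passNT rest)) = '\'' :: passS (passRE (passNT rest)) :=
          repF_skip' _ _ _ _ (by
            rw [List.cons_prefix_cons]
            rintro ⟨-, h⟩
            rcases h with ⟨t', ht'⟩
            exact hs1 (by rw [← ht']; rfl))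
        have hm1 : (passS (passRE (passNT rest))).head? ≠ some 'm' := by
          intro hh; simp only [passNT, passRE, passS] at hh
          exact hm (repF_head_ne _ _ rfl _ (by decide) _
            (repF_head_ne _ _ rfl _ (by decide) _
              (repF_head_ne _ _ rfl _ (by decide) _ hh)))
        have s4 : passM ('\'' :: passS (passRE (passNT rest)))
            = '\'' :: passM (passS (passRE (passNT rest))) :=
          repF_skip' _ _ _ _ (by
            rw [List.cons_prefix_cons]
            rintro ⟨-, h⟩
            rcases h with ⟨t', ht'⟩
            exact hm1 (by rw [← ht']; rfl))
        have hve1 : ¬ ['v', 'e'] <+: passM (passS (passRE (passNT rest))) := by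
          intro h
          simp only [passNT, passRE, passS, passM] at h
          exact hve (repF_prefix2 _ _ rfl _ _ (by decide) (by decide) _
            (repF_prefix2 _ _ rfl _ _ (by decide) (by decide) _
              (repF_prefix2 _ _ rfl _ _ (by decide) (by decide) _
                (repF_prefix2 _ _ rfl _ _ (by decide) (by decide) _ h))))
        have s5 : passVE ('\'' :: passM (passS (passRE (passNT rest))))
            = '\'' :: passVE (passM (passS (passRE (passNT rest)))) :=
          repF_skip' _ _ _ _ (by
            rw [List.cons_prefix_cons]; rintro ⟨-, h⟩; exact hve1 h)
        have hll1 : ¬ ['l', 'l'] <+: passVE (passM (passS (passRE (passNT rest)))) := by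
          intro h
          simp only [passNT, passRE, passS, passM, passVE] at h
          exact hll (repF_prefix2 _ _ rfl _ _ (by decide) (by decide) _
            (repF_prefix2 _ _ rfl _ _ (by decide) (by decide) _
              (repF_prefix2 _ _ rfl _ _ (by decide) (by decide) _
                (repF_prefix2 _ _ rfl _ _ (by decide) (by decide) _
                  (repF_prefix2 _ _ rfl _ _ (by decide) (by decide) _ h)))))
        have s6 : passLL ('\'' :: passVE (passM (passS (passRE (passNT rest)))))
            = '\'' :: passLL (passVE (passM (passS (passRE (passNT rest))))) :=
          repF_skip' _ _ _ _ (by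
            rw [List.cons_prefix_cons]; rintro ⟨-, h⟩; exact hll1 h)
        have hd1 : (passLL (passVE (passM (passS (passRE (passNT rest)))))).head? ≠ some 'd' := by
          intro hh; simp only [passNT, passRE, passS, passM, passVE, passLL] at hh
          exact hd (repF_head_ne _ _ rfl _ (by decide) _
            (repF_head_ne _ _ rfl _ (by decide) _
              (repF_head_ne _ _ rfl _ (by decide) _
                (repF_head_ne _ _ rfl _ (by decide) _
                  (repF_head_ne _ _ rfl _ (by decide) _
                    (repF_head_ne _ _ rfl _ (by decide) _ hh))))))
        have s7 : passD ('\'' :: passLL (passVE (passM (passS (passRE (passNT rest))))))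
            = '\'' :: passD (passLL (passVE (passM (passS (passRE (passNT rest)))))) :=
          repF_skip' _ _ _ _ (by
            rw [List.cons_prefix_cons]
            rintro ⟨-, h⟩
            rcases h with ⟨t', ht'⟩
            exact hd1 (by rw [← ht']; rfl))
        simp only [hcChain, s1, s2, s3, s4, s5, s6, s7]
      · simp only [hcChain, passNT_cons c _ hn,
          passRE_cons c _ hq, passS_cons c _ hq, passM_cons c _ hq,
          passVE_cons c _ hq, passLL_cons c _ hq, passD_cons c _ hq]
  | case9 =>
    simp [hcChain, passNT, passRE, passS, passM, passVE, passLL, passD, repF_nil, hcScan]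

lemma handle_contraction_toList (text : String) :
    (handle_contraction text).toList = hcChain text.toList := by
  simp only [handle_contraction, hcContractions, List.foldl, PySem.Str.toList_replace]
  rw [show ("n't" : String).toList = ['n', '\'', 't'] from rfl,
      show (" not" : String).toList = [' ', 'n', 'o', 't'] from rfl,
      show ("'re" : String).toList = ['\'', 'r', 'e'] from rfl,
      show (" are" : String).toList = [' ', 'a', 'r', 'e'] from rfl,
      show ("'s" : String).toList = ['\'', 's'] from rfl,
      show (" is" : String).toList = [' ', 'i', 's'] from rfl,
      show ("'m" : String).toList = ['\'', 'm'] from rfl,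
      show (" am" : String).toList = [' ', 'a', 'm'] from rfl,
      show ("'ve" : String).toList = ['\'', 'v', 'e'] from rfl,
      show (" have" : String).toList = [' ', 'h', 'a', 'v', 'e'] from rfl,
      show ("'ll" : String).toList = ['\'', 'l', 'l'] from rfl,
      show (" will" : String).toList = [' ', 'w', 'i', 'l', 'l'] from rfl,
      show ("'d" : String).toList = ['\'', 'd'] from rfl,
      show (" would" : String).toList = [' ', 'w', 'o', 'u', 'l', 'd'] from rfl]
  rw [replace_eq_repF _ _ _ (by decide), replace_eq_repF _ _ _ (by decide),
      replace_eq_repF _ _ _ (by decide), replace_eq_repF _ _ _ (by decide),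
      replace_eq_repF _ _ _ (by decide), replace_eq_repF _ _ _ (by decide),
      replace_eq_repF _ _ _ (by decide)]
  rfl

theorem handle_contraction_spec : Claim_equal_handle_contraction := by
  intro text _
  unfold Spec_handle_contraction handle_contraction_alt
  have h : (handle_contraction text).toList = (String.ofList (hcScan text.toList)).toList := by
    rw [handle_contraction_toList, hcChain_eq_scan]
    simp
  exact String.toList_injective h
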